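-- pv_equiv track=rewrite | github.com/FiiiiiiiiiiiiiiiiiiiiiiiiSH/zzz | utils.py | clear_tables
-- ===== SOURCE A (Python) =====
-- def clear_tables(text: str) -> str:
--     '''надо найти в маркдаун таблицах блоки кода (однострочного `кода`) и заменить ` на пробелы
--     признаки таблицы - 2 и более идущих подряд строки которые начинаются и заканчиваются на | и количество | в них совпадает
--     '''
--     lines = text.splitlines()
--     in_table = False
--     table_lines = []
--     result = []
--
--     for line in lines:
--         if line.startswith("|") and line.endswith("|") and line.count("|") > 1:
--             if not in_table:
--                 table_lines = []  # Start a new table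
--                 in_table = True
--             table_lines.append(line)
--
--         else:
--             if in_table:
--                 # Process the table lines
--                 processed_table_lines = []
--                 for table_line in table_lines:
--                     processed_table_lines.append(table_line.replace("`", " "))
--                 result.extend(processed_table_lines)
--                 table_lines = []
--                 in_table = False
--
--             result.append(line)
--
--     if in_table:  # If the text ends inside a table block
--       processed_table_lines = []
--       for table_line in table_lines:
--           processed_table_lines.append(table_line.replace("`", " "))
--       result.extend(processed_table_lines)
--
--     return "\n".join(result)
-- ===== SOURCE B (Python) =====
-- def clear_tables(text: str) -> str:
--     def is_table_line(line: str) -> bool: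
--         return line.startswith("|") and line.endswith("|") and line.count("|") > 1
--     return "\n".join(
--         line.replace("`", " ") if is_table_line(line) else line
--         for line in text.splitlines()
--     )
-- ===== Notes on version B (the rewrite author's own statement) =====
-- stated objective: simpler
-- what changed: Replaced the in_table state machine with its table_lines buffer and flush branches by a stateless per-line map: each line matching the table-line predicate is backtick-replaced, others kept, then joined; the buffering in A never affects the output.
import Mathlib
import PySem

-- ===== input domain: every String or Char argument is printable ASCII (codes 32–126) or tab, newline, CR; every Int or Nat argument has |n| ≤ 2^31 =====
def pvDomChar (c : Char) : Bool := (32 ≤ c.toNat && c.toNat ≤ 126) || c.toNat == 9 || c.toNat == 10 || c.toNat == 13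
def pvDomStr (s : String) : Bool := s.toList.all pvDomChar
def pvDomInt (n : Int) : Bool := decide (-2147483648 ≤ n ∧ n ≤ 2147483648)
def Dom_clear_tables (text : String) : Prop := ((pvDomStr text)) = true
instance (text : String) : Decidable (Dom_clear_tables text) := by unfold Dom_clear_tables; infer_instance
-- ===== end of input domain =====

-- B replaces A's in_table state machine (buffer + flush branches) by a stateless
-- per-line map, which is simpler; the buffering in A never affects the output.


-- ===== PORT A =====
-- state = (in_table, table_lines, result); one step of A's loop body
def clearTablesStepA (st : Bool × List String × List String) (line : String) :
    Bool × List String × List String :=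
  let in_table := st.1
  let table_lines := st.2.1
  let result := st.2.2
  if PySem.Str.startswith line "|" && PySem.Str.endswith line "|"
      && decide (PySem.Str.count line "|" > 1) then
    let table_lines := if !in_table then [] else table_lines  -- Start a new table
    (true, table_lines ++ [line], result)
  else
    if in_table then
      let processed_table_lines := table_lines.map (fun t => PySem.Str.replace t "`" " ")
      (false, [], (result ++ processed_table_lines) ++ [line])
    else
      (false, table_lines, result ++ [line])

def clear_tables (text : String) : String :=
  let lines := PySem.Str.splitlines text
  let st := lines.foldl clearTablesStepA (false, [], [])
  let result :=
    if st.1 then  -- text ends inside a table block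
      st.2.2 ++ st.2.1.map (fun t => PySem.Str.replace t "`" " ")
    else st.2.2
  PySem.Str.join "\n" result

-- ===== PORT B =====
def isTableLine (line : String) : Bool :=
  PySem.Str.startswith line "|" && PySem.Str.endswith line "|"
    && decide (PySem.Str.count line "|" > 1)

def clear_tables_alt (text : String) : String :=
  PySem.Str.join "\n"
    ((PySem.Str.splitlines text).map
      (fun line => if isTableLine line then PySem.Str.replace line "`" " " else line))

-- ===== PRECONDITION & SPEC =====
def Spec_clear_tables (text : String) (out : String) : Prop := out = clear_tables_alt text
instance (text : String) (out : String) : Decidable (Spec_clear_tables text out) := by unfold Spec_clear_tables; infer_instance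

-- ===== CLAIM (what is proved, stated in full; the proofs are below) =====
def Claim_equal_clear_tables : Prop := ∀ (text : String), Dom_clear_tables text → Spec_clear_tables text (clear_tables text)

-- ===== LEMMAS AND PROOFS =====

-- the output list A's state denotes: result, plus the pending buffer (replaced) when inside a table
def clearTablesFlush (st : Bool × List String × List String) : List String :=
  if st.1 then st.2.2 ++ st.2.1.map (fun t => PySem.Str.replace t "`" " ") else st.2.2

lemma flush_step (st : Bool × List String × List String) (line : String) :
    clearTablesFlush (clearTablesStepA st line) =
      clearTablesFlush st ++
        [if isTableLine line then PySem.Str.replace line "`" " " else line] := by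
  obtain ⟨it, tl, res⟩ := st
  cases it <;>
    simp only [clearTablesStepA, clearTablesFlush, isTableLine] <;>
    split_ifs <;> simp_all

lemma flush_foldl (lines : List String) (st : Bool × List String × List String) :
    clearTablesFlush (lines.foldl clearTablesStepA st) =
      clearTablesFlush st ++
        lines.map (fun line =>
          if isTableLine line then PySem.Str.replace line "`" " " else line) := by
  induction lines generalizing st with
  | nil => simp
  | cons l ls ih => simp [List.foldl_cons, ih, flush_step]

-- ===== VERDICT (by name: the statement is the Claim_ definition above) =====
theorem clear_tables_spec : Claim_equal_clear_tables := by
  intro text _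
  unfold Spec_clear_tables clear_tables clear_tables_alt
  have h := flush_foldl (PySem.Str.splitlines text) (false, [], [])
  simp only [clearTablesFlush, isTableLine] at h ⊢
  rw [h]
  simp
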